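-- pv_equiv track=rewrite | github.com/shoham-z/reversing | ReversingHero/1/2/PythonSimulation/main.py | generate_num
-- ===== SOURCE A (Python) =====
-- def generate_num(i):
--     i += 0x55
--     for _ in range(0, 3):
--         i &= 0x1f
--         i = i >> 1 | i << 4
--
--     i *= 3
--     i &= 0x1f
--     return i
-- ===== SOURCE B (Python) =====
-- # The whole computation only depends on (i + 0x55) mod 32, so precompute the
-- # 32-entry permutation table once and index into it.
-- _TABLE = [0, 12, 24, 4, 16, 28, 8, 20, 3, 15, 27, 7, 19, 31, 11, 23,
--           6, 18, 30, 10, 22, 2, 14, 26, 9, 21, 1, 13, 25, 5, 17, 29]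
--
-- def generate_num(i):
--     return _TABLE[(i + 0x55) & 0x1f]
-- ===== Notes on version B (the rewrite author's own statement) =====
-- stated objective: simpler
-- what changed: Replaces the three mask-and-rotate rounds plus multiply-and-mask by a single lookup in a precomputed 32-entry permutation table indexed by (i + 0x55) & 0x1f, since the result depends only on that 5-bit residue.
import Mathlib
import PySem

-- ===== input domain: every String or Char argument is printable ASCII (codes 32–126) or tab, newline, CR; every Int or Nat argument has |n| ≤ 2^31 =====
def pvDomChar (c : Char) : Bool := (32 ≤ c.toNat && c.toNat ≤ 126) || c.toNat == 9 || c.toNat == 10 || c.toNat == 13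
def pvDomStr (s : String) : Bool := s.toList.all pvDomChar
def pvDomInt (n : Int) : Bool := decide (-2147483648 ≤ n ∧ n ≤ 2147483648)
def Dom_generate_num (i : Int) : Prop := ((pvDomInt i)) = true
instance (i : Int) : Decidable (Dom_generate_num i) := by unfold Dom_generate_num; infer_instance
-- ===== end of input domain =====

-- B replaces the mask-and-rotate loop by a single lookup in a precomputed 32-entry
-- permutation table indexed by (i + 0x55) & 0x1f (objective: simpler).

-- ===== PORT A =====
def generate_num (i : Int) : Int :=
  let i := i + 0x55
  let i := (PySem.List.pyRange 0 3 1).foldl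
    (fun i _ =>
      let i := PySem.Int.band i 0x1f
      PySem.Int.bor (i >>> (1 : Nat)) (i <<< (4 : Nat))) i
  let i := i * 3
  PySem.Int.band i 0x1f

-- ===== PORT B =====
def pvTable : List Int :=
  [0, 12, 24, 4, 16, 28, 8, 20, 3, 15, 27, 7, 19, 31, 11, 23,
   6, 18, 30, 10, 22, 2, 14, 26, 9, 21, 1, 13, 25, 5, 17, 29]

-- the index (i + 0x55) & 0x1f is always in [0, 32), so pyGet? is always `some`;
-- `getD 0` only totalizes the Option.
def generate_num_alt (i : Int) : Int :=
  (PySem.List.pyGet? pvTable (PySem.Int.band (i + 0x55) 0x1f)).getD 0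

-- ===== PRECONDITION & SPEC =====
def Spec_generate_num (i : Int) (out : Int) : Prop := out = generate_num_alt i
instance (i : Int) (out : Int) : Decidable (Spec_generate_num i out) := by unfold Spec_generate_num; infer_instance

-- ===== CLAIM (what is proved, stated in full; the proofs are below) =====
def Claim_equal_generate_num : Prop := ∀ (i : Int), Dom_generate_num i → Spec_generate_num i (generate_num i)

-- ===== LEMMAS AND PROOFS =====

-- masking with 0x1f is reduction mod 32, also for negative ints (Python semantics)
theorem band31_eq_emod (x : Int) : PySem.Int.band x 31 = x % 32 := by
  have h31 : (31 : Int).toNat = 31 := rfl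
  have hm : ∀ m : Nat, m &&& 31 = m % 32 := by
    intro m; have := Nat.and_two_pow_sub_one_eq_mod m 5; norm_num at this; exact this
  rw [PySem.Int.band.eq_1]
  split_ifs with h h2 h2
  · rw [h31, hm]; omega
  · norm_num at h2
  · rw [h31, Nat.and_comm, hm]; omega
  · norm_num at h2

-- A's result depends only on (i + 0x55) mod 32
theorem genA_resid (i : Int) : generate_num i = generate_num ((i + 85) % 32 - 85) := by
  simp only [generate_num, show PySem.List.pyRange 0 3 1 = [0, 1, 2] from by decide,
    List.foldl, band31_eq_emod, Int.sub_add_cancel, Int.emod_emod_of_dvd _ dvd_rfl]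

theorem genB_resid (i : Int) : generate_num_alt i = generate_num_alt ((i + 85) % 32 - 85) := by
  simp only [generate_num_alt, band31_eq_emod, Int.sub_add_cancel,
    Int.emod_emod_of_dvd _ dvd_rfl]

-- ===== VERDICT (by name: the statement is the Claim_ definition above) =====
theorem generate_num_spec : Claim_equal_generate_num := by
  intro i _
  show generate_num i = generate_num_alt i
  rw [genA_resid, genB_resid]
  have h0 : 0 ≤ (i + 85) % 32 := Int.emod_nonneg _ (by norm_num)
  have h1 : (i + 85) % 32 < 32 := Int.emod_lt_of_pos _ (by norm_num)
  set n : Int := (i + 85) % 32 with hn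
  clear_value n
  interval_cases n <;> decide
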